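-- pv_equiv track=rewrite | github.com/shucoshuco/adventofcode | 2020/11.py | execute
-- ===== SOURCE A (Python) =====
-- import copy
--
-- def is_valid(grid, row, col):
--     return 0 <= row < len(grid) and col >= 0 and col < len(grid[row])
--
-- def next_seat(grid, row, col, row_step, col_step):
--     next_row = row + row_step
--     next_col = col + col_step
--     while is_valid(grid, next_row, next_col) and grid[next_row][next_col] == '.':
--         next_row = next_row + row_step
--         next_col = next_col + col_step
--     if not is_valid(grid, next_row, next_col):
--         return '.'
--     return grid[next_row][next_col]
--
-- def sum_adjacents(grid, row, col):
--     sum = 0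
--     for x in range(-1, 2):
--         for y in range(-1, 2):
--             if (x != 0 or y != 0) and next_seat(grid, row, col, x, y) == '#':
--                 sum = sum + 1
--     return sum
--
-- def next_state(grid, row, col):
--     if grid[row][col] == '.':
--         return '.'
--     sum = sum_adjacents(grid, row, col)
--     if sum == 0:
--         return '#'
--     if sum >= 5:
--         return 'L'
--     return grid[row][col]
--
-- def execute(grid):
--     sum = 0
--     new_grid = copy.deepcopy(grid)
--     for row in range(0, len(grid)):
--         for col in range(0, len(grid[row])):
--             new_grid[row][col] = next_state(grid, row, col)
--             if new_grid[row][col] != grid[row][col]: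
--                 sum = sum + 1
--     return sum, new_grid
-- ===== SOURCE B (Python) =====
-- def execute(grid):
--     # One step of the line-of-sight seat automaton. Instead of ray-casting from
--     # every cell (O(R*C*max(R,C))), precompute the nearest visible seat in each
--     # of the 8 directions with linear sweeps, then count neighbours in O(1).
--     R = len(grid)
--
--     def row_vis_from(neighbor, row_len, dc):
--         # visible seat per column when looking into the adjacent row 'neighbor'
--         # = (cells, vis) with a column offset dc; None = no adjacent row.
--         out = []
--         for c in range(row_len):
--             nc = c + dc
--             if neighbor is not None and 0 <= nc < len(neighbor[0]):
--                 v = neighbor[0][nc]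
--                 out.append(v if v != '.' else neighbor[1][nc])
--             else:
--                 out.append('.')
--         return out
--
--     def sweep_vertical(dr, dc):
--         # process rows so that the row a cell looks into is handled first
--         rows = grid if dr == -1 else grid[::-1]
--         vis = []
--         neighbor = None
--         for row in rows:
--             v = row_vis_from(neighbor, len(row), dc)
--             vis.append(v)
--             neighbor = (row, v)
--         return vis if dr == -1 else vis[::-1]
--
--     def scan_left(row):
--         # visible seat strictly to the left of each cell
--         out, cur = [], '.'
--         for v in row:
--             out.append(cur)
--             cur = v if v != '.' else cur
--         return out
--
--     def sweep_horizontal(dc):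
--         if dc == -1:
--             return [scan_left(row) for row in grid]
--         return [scan_left(row[::-1])[::-1] for row in grid]
--
--     tables = [sweep_vertical(dr, dc) for dr in (-1, 1) for dc in (-1, 0, 1)]
--     tables.append(sweep_horizontal(-1))
--     tables.append(sweep_horizontal(1))
--
--     changes = 0
--     new_grid = []
--     for r, row in enumerate(grid):
--         new_row = []
--         for c, v in enumerate(row):
--             if v == '.':
--                 nv = '.'
--             else:
--                 s = sum(1 for t in tables if t[r][c] == '#')
--                 nv = '#' if s == 0 else ('L' if s >= 5 else v)
--             if nv != v:
--                 changes += 1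
--             new_row.append(nv)
--         new_grid.append(new_row)
--     return changes, new_grid
-- ===== Notes on version B (the rewrite author's own statement) =====
-- stated objective: faster
-- what changed: Replaced per-cell ray-casting in 8 directions with 8 whole-grid linear sweeps that propagate the nearest visible seat, so each cell's neighbour count is O(1).
import Mathlib
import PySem

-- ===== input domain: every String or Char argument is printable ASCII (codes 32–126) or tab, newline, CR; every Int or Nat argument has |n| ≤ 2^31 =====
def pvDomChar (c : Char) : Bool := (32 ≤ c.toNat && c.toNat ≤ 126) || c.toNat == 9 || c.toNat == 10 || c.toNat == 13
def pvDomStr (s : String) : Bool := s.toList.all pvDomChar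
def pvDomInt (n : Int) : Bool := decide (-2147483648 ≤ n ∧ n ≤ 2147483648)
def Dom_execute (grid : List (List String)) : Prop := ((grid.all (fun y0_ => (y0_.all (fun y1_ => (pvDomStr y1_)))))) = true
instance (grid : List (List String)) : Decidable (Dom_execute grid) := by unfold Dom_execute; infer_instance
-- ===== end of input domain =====

-- B replaces A's per-cell 8-direction ray-casting by eight linear sweeps that propagate the
-- nearest visible seat across the grid, making each cell's neighbour count O(1) (objective: faster).


-- ===== PORT A =====
def pvIsValid (grid : List (List String)) (row col : Int) : Bool :=
  if 0 ≤ row ∧ row < (grid.length : Int) ∧ 0 ≤ col then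
    match PySem.List.pyGet? grid row with
    | some r => decide (col < (r.length : Int))
    | none => false
  else false

def pvCell (grid : List (List String)) (r c : Int) : String :=
  PySem.List.pyGetD (PySem.List.pyGetD grid r []) c ""

-- the 'while' loop of next_seat, with fuel (pvFuel below always suffices: the loop leaves the grid)
def pvGo (grid : List (List String)) (rs cs : Int) : Nat → Int → Int → Int × Int
  | 0, r, c => (r, c)
  | fuel+1, r, c =>
      if pvIsValid grid r c ∧ pvCell grid r c = "." then
        pvGo grid rs cs fuel (r + rs) (c + cs)
      else (r, c)

def pvMaxLen (grid : List (List String)) : Nat := (grid.map List.length).foldl max 0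
def pvFuel (grid : List (List String)) : Nat := grid.length + pvMaxLen grid + 2

def nextSeat (grid : List (List String)) (row col rs cs : Int) : String :=
  let p := pvGo grid rs cs (pvFuel grid) (row + rs) (col + cs)
  if pvIsValid grid p.1 p.2 then pvCell grid p.1 p.2 else "."

def sumAdjacents (grid : List (List String)) (row col : Int) : Int :=
  (PySem.List.pyRange (-1) 2 1).foldl (fun s x =>
    (PySem.List.pyRange (-1) 2 1).foldl (fun s y =>
      if (¬ x = 0 ∨ ¬ y = 0) ∧ nextSeat grid row col x y = "#" then s + 1 else s) s) 0

def nextState (grid : List (List String)) (row col : Int) : String :=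
  if pvCell grid row col = "." then "."
  else
    let s := sumAdjacents grid row col
    if s = 0 then "#"
    else if 5 ≤ s then "L"
    else pvCell grid row col

def pvSet2 (g : List (List String)) (r c : Int) (v : String) : List (List String) :=
  g.set r.toNat ((PySem.List.pyGetD g r []).set c.toNat v)

def execute (grid : List (List String)) : Int × List (List String) :=
  (PySem.List.pyRange 0 (grid.length : Int) 1).foldl (fun st row =>
      (PySem.List.pyRange 0 ((PySem.List.pyGetD grid row []).length : Int) 1).foldl (fun st col =>
          ((if nextState grid row col ≠ pvCell grid row col then st.1 + 1 else st.1),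
           pvSet2 st.2 row col (nextState grid row col))) st)
    ((0 : Int), grid)

-- ===== PORT B =====
def rowVisFrom (nb : Option (List String × List String)) (rowLen : Nat) (dc : Int) : List String :=
  (List.range rowLen).map (fun c : Nat =>
    let nc : Int := (c : Int) + dc
    match nb with
    | some pr =>
        if 0 ≤ nc ∧ nc < (pr.1.length : Int) then
          let v := PySem.List.pyGetD pr.1 nc ""
          if v ≠ "." then v else PySem.List.pyGetD pr.2 nc ""
        else "."
    | none => ".")

def vertGo (dc : Int) : List (List String) → Option (List String × List String) → List (List String)
  | [], _ => []
  | row :: rest, nb =>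
      let v := rowVisFrom nb row.length dc
      v :: vertGo dc rest (some (row, v))

def sweepVertical (grid : List (List String)) (dr dc : Int) : List (List String) :=
  let rows := if dr = -1 then grid else grid.reverse
  let vis := vertGo dc rows none
  if dr = -1 then vis else vis.reverse

def scanLeftGo : List String → String → List String
  | [], _ => []
  | v :: rest, cur => cur :: scanLeftGo rest (if v ≠ "." then v else cur)

def scanLeft (row : List String) : List String := scanLeftGo row "."

def sweepHorizontal (grid : List (List String)) (dc : Int) : List (List String) :=
  if dc = -1 then grid.map scanLeft
  else grid.map (fun row => (scanLeft row.reverse).reverse)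

def pvTables (grid : List (List String)) : List (List (List String)) :=
  [sweepVertical grid (-1) (-1), sweepVertical grid (-1) 0, sweepVertical grid (-1) 1,
   sweepVertical grid 1 (-1), sweepVertical grid 1 0, sweepVertical grid 1 1,
   sweepHorizontal grid (-1), sweepHorizontal grid 1]

def countSharp (tables : List (List (List String))) (r c : Int) : Int :=
  tables.foldl (fun s t => if pvCell t r c = "#" then s + 1 else s) 0

def altCell (tables : List (List (List String))) (r c : Int) (v : String) : String :=
  if v = "." then "."
  else
    let s := countSharp tables r c
    if s = 0 then "#" else if 5 ≤ s then "L" else v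

def execute_alt (grid : List (List String)) : Int × List (List String) :=
  let tables := pvTables grid
  (PySem.List.enumerate grid).foldl (fun st rr =>
      let rowRes := (PySem.List.enumerate rr.2).foldl (fun st2 cv =>
          (st2.1 + (if altCell tables rr.1 cv.1 cv.2 ≠ cv.2 then (1:Int) else 0),
           st2.2 ++ [altCell tables rr.1 cv.1 cv.2])) ((st.1 : Int), ([] : List String))
      (rowRes.1, st.2 ++ [rowRes.2]))
    ((0 : Int), ([] : List (List String)))

-- ===== PRECONDITION & SPEC =====
def Spec_execute (grid : List (List String)) (out : Int × List (List String)) : Prop := out = execute_alt grid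
instance (grid : List (List String)) (out : Int × List (List String)) : Decidable (Spec_execute grid out) := by unfold Spec_execute; infer_instance

-- ===== CLAIM (what is proved, stated in full; the proofs are below) =====
def Claim_equal_execute : Prop := ∀ (grid : List (List String)), Dom_execute grid → Spec_execute grid (execute grid)

-- ===== LEMMAS AND PROOFS =====

theorem pv_isValid_iff (grid : List (List String)) (r c : Int) :
    pvIsValid grid r c = true ↔
      0 ≤ r ∧ r < (grid.length : Int) ∧ 0 ≤ c ∧ c < ((PySem.List.pyGetD grid r []).length : Int) := by
  unfold pvIsValid
  by_cases h : 0 ≤ r ∧ r < (grid.length : Int) ∧ 0 ≤ c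
  · obtain ⟨h1, h2, h3⟩ := h
    have hlt : r.toNat < grid.length := by omega
    have : PySem.List.pyGet? grid r = some (grid[r.toNat]) := by
      have := PySem.List.pyGet?_natCast grid r.toNat
      rw [show ((r.toNat : Nat) : Int) = r by omega] at this
      simp [this, List.getElem?_eq_getElem hlt]
    simp [h1, h2, h3, PySem.List.pyGetD]
  · simp only [if_neg h]
    simp only [Bool.false_eq_true, false_iff]
    intro ⟨a, b, cc, _⟩; exact h ⟨a, b, cc⟩

theorem pv_cell_nat (grid : List (List String)) (r c : Nat) :
    pvCell grid (r : Int) (c : Int) = (grid.getD r []).getD c "" := by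
  simp [pvCell, PySem.List.pyGetD_natCast]

theorem pv_len_le_max (grid : List (List String)) (row : List String) (h : row ∈ grid) :
    row.length ≤ pvMaxLen grid :=
  (PySem.List.le_foldl_max (grid.map List.length) 0).2 row.length (List.mem_map_of_mem h)

-- ---- the while loop: stop, fuel-stability, one-step recurrence ----
theorem pv_go_stop (grid : List (List String)) (rs cs : Int) (f : Nat) (r c : Int)
    (h : ¬ (pvIsValid grid r c = true ∧ pvCell grid r c = ".")) :
    pvGo grid rs cs f r c = (r, c) := by
  cases f with
  | zero => rfl
  | succ f => simp [pvGo, if_neg h]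

theorem pv_go_stable (grid : List (List String)) (rs cs : Int) (μ : Int → Int → Nat)
    (H : ∀ r c, pvIsValid grid r c = true → pvCell grid r c = "." → μ (r + rs) (c + cs) < μ r c) :
    ∀ (f₁ : Nat) (f₂ : Nat) (r c : Int), μ r c ≤ f₁ → μ r c ≤ f₂ →
      pvGo grid rs cs f₁ r c = pvGo grid rs cs f₂ r c := by
  intro f₁
  induction f₁ with
  | zero =>
    intro f₂ r c h1 h2
    rw [pv_go_stop, pv_go_stop]
    · intro ⟨hv, hd⟩; exact absurd (H r c hv hd) (by omega)
    · intro ⟨hv, hd⟩; exact absurd (H r c hv hd) (by omega)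
  | succ f ih =>
    intro f₂ r c h1 h2
    by_cases hc : pvIsValid grid r c = true ∧ pvCell grid r c = "."
    · have hlt := H r c hc.1 hc.2
      cases f₂ with
      | zero => exact absurd hlt (by omega)
      | succ f₂ =>
        simp only [pvGo, if_pos hc]
        exact ih f₂ _ _ (by omega) (by omega)
    · rw [pv_go_stop _ _ _ _ _ _ hc, pv_go_stop _ _ _ _ _ _ hc]

theorem pv_seat_rec (grid : List (List String)) (row col rs cs : Int) (μ : Int → Int → Nat)
    (H : ∀ r c, pvIsValid grid r c = true → pvCell grid r c = "." → μ (r + rs) (c + cs) < μ r c)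
    (hb : μ (row + rs) (col + cs) ≤ pvFuel grid) :
    nextSeat grid row col rs cs =
      if pvIsValid grid (row + rs) (col + cs) = true then
        (if pvCell grid (row + rs) (col + cs) = "." then nextSeat grid (row + rs) (col + cs) rs cs
         else pvCell grid (row + rs) (col + cs))
      else "." := by
  have hf : ∃ f, pvFuel grid = f + 1 := ⟨grid.length + pvMaxLen grid + 1, by unfold pvFuel; omega⟩
  obtain ⟨f, hfe⟩ := hf
  by_cases hc : pvIsValid grid (row + rs) (col + cs) = true ∧ pvCell grid (row + rs) (col + cs) = "."
  · have hlt := H _ _ hc.1 hc.2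
    have e0 : ∀ r c, pvGo grid rs cs (f+1) r c =
        if pvIsValid grid r c ∧ pvCell grid r c = "." then pvGo grid rs cs f (r+rs) (c+cs)
        else (r, c) := fun r c => rfl
    have key : pvGo grid rs cs (pvFuel grid) (row+rs) (col+cs)
        = pvGo grid rs cs (pvFuel grid) (row+rs+rs) (col+cs+cs) := by
      conv_lhs => rw [hfe]
      rw [e0, if_pos hc, hfe]
      exact pv_go_stable grid rs cs μ H f (f+1) _ _ (by omega) (by omega)
    simp only [nextSeat]
    rw [if_pos hc.1, if_pos hc.2, key]
  · simp only [nextSeat, hfe]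
    rw [show pvGo grid rs cs (f+1) (row+rs) (col+cs) = _ from pv_go_stop _ _ _ _ _ _ hc]
    by_cases hv : pvIsValid grid (row + rs) (col + cs) = true
    · have hd : ¬ pvCell grid (row + rs) (col + cs) = "." := fun hd => hc ⟨hv, hd⟩
      simp [hv, hd]
    · simp [hv]

theorem pv_seat_rec_up (grid : List (List String)) (row col dc : Int)
    (hrow : row < (grid.length : Int)) :
    nextSeat grid row col (-1) dc =
      if pvIsValid grid (row - 1) (col + dc) = true then
        (if pvCell grid (row - 1) (col + dc) = "." then nextSeat grid (row - 1) (col + dc) (-1) dc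
         else pvCell grid (row - 1) (col + dc))
      else "." := by
  have h := pv_seat_rec grid row col (-1) dc (fun r _ => (r + 1).toNat)
    (by intro r c hv _; have := (pv_isValid_iff grid r c).mp hv
        show (r + -1 + 1).toNat < (r + 1).toNat; omega)
    (by show (row + -1 + 1).toNat ≤ pvFuel grid; simp only [pvFuel]; omega)
  rw [h]
  simp only [show row + -1 = row - 1 from by ring]

theorem pv_seat_rec_left (grid : List (List String)) (row col : Int)
    (hcol : col ≤ (pvMaxLen grid : Int)) :
    nextSeat grid row col 0 (-1) =
      if pvIsValid grid row (col - 1) = true then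
        (if pvCell grid row (col - 1) = "." then nextSeat grid row (col - 1) 0 (-1)
         else pvCell grid row (col - 1))
      else "." := by
  have h := pv_seat_rec grid row col 0 (-1) (fun _ c => (c + 1).toNat)
    (by intro r c hv _; have := (pv_isValid_iff grid r c).mp hv
        show (c + -1 + 1).toNat < (c + 1).toNat; omega)
    (by show (col + -1 + 1).toNat ≤ pvFuel grid; simp only [pvFuel]; omega)
  rw [h]
  simp only [show col + -1 = col - 1 from by ring, show row + 0 = row from by ring]

theorem pv_pyGetD_rev (grid : List (List String)) (r : Int) (h0 : 0 ≤ r)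
    (h1 : r < (grid.length : Int)) :
    PySem.List.pyGetD grid.reverse ((grid.length : Int) - 1 - r) [] = PySem.List.pyGetD grid r [] := by
  rw [PySem.List.pyGetD_of_nonneg _ _ (by omega), PySem.List.pyGetD_of_nonneg _ _ h0]
  have hi : ((grid.length : Int) - 1 - r).toNat < grid.reverse.length := by
    simp only [List.length_reverse]; omega
  have hr : r.toNat < grid.length := by omega
  rw [List.getD_eq_getElem _ _ hi, List.getD_eq_getElem _ _ hr, List.getElem_reverse]
  congr 1
  omega

theorem pv_valid_rev (grid : List (List String)) (r c : Int) :
    pvIsValid grid.reverse ((grid.length : Int) - 1 - r) c = pvIsValid grid r c := by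
  by_cases hr : 0 ≤ r ∧ r < (grid.length : Int)
  · have := pv_pyGetD_rev grid r hr.1 hr.2
    rw [Bool.eq_iff_iff, pv_isValid_iff, pv_isValid_iff, this]
    simp only [List.length_reverse]
    omega
  · rw [Bool.eq_iff_iff, pv_isValid_iff, pv_isValid_iff]
    simp only [List.length_reverse]
    omega

theorem pv_cell_rev (grid : List (List String)) (r c : Int) (h : pvIsValid grid r c = true) :
    pvCell grid.reverse ((grid.length : Int) - 1 - r) c = pvCell grid r c := by
  have hv := (pv_isValid_iff grid r c).mp h
  unfold pvCell
  rw [pv_pyGetD_rev grid r hv.1 hv.2.1]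

theorem pv_go_rev (grid : List (List String)) (dc : Int) :
    ∀ (f : Nat) (r c : Int),
      pvGo grid.reverse (-1) dc f ((grid.length : Int) - 1 - r) c =
        (((grid.length : Int) - 1 - (pvGo grid 1 dc f r c).1), (pvGo grid 1 dc f r c).2) := by
  intro f
  induction f with
  | zero => intro r c; rfl
  | succ f ih =>
    intro r c
    by_cases hc : pvIsValid grid r c = true ∧ pvCell grid r c = "."
    · have hv' : pvIsValid grid.reverse ((grid.length : Int) - 1 - r) c = true := by
        rw [pv_valid_rev]; exact hc.1
      have hd' : pvCell grid.reverse ((grid.length : Int) - 1 - r) c = "." := by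
        rw [pv_cell_rev _ _ _ hc.1]; exact hc.2
      simp only [pvGo, if_pos hc, if_pos (And.intro hv' hd')]
      rw [show (grid.length : Int) - 1 - r + -1 = (grid.length : Int) - 1 - (r + 1) by ring]
      exact ih (r + 1) (c + dc)
    · have hc' : ¬ (pvIsValid grid.reverse ((grid.length : Int) - 1 - r) c = true ∧
          pvCell grid.reverse ((grid.length : Int) - 1 - r) c = ".") := by
        intro ⟨hv', hd'⟩
        rw [pv_valid_rev] at hv'
        exact hc ⟨hv', by rw [pv_cell_rev _ _ _ hv'] at hd'; exact hd'⟩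
      rw [pv_go_stop _ _ _ _ _ _ hc', pv_go_stop _ _ _ _ _ _ hc]

theorem pv_seat_rev (grid : List (List String)) (r c dc : Int) (h0 : 0 ≤ r)
    (h1 : r < (grid.length : Int)) :
    nextSeat grid.reverse ((grid.length : Int) - 1 - r) c (-1) dc = nextSeat grid r c 1 dc := by
  have hstab : pvGo grid 1 dc (pvFuel grid.reverse) (r + 1) (c + dc)
      = pvGo grid 1 dc (pvFuel grid) (r + 1) (c + dc) := by
    apply pv_go_stable grid 1 dc (fun r _ => ((grid.length : Int) - r).toNat)
      (by intro r c hv _; have := (pv_isValid_iff grid r c).mp hv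
          show ((grid.length : Int) - (r + 1)).toNat < ((grid.length : Int) - r).toNat; omega)
    · simp only [pvFuel, List.length_reverse]; omega
    · simp only [pvFuel]; omega
  simp only [nextSeat]
  rw [show (grid.length : Int) - 1 - r + -1 = (grid.length : Int) - 1 - (r + 1) by ring,
      pv_go_rev grid dc _ (r + 1) (c + dc), hstab]
  set p := pvGo grid 1 dc (pvFuel grid) (r + 1) (c + dc)
  rw [pv_valid_rev]
  by_cases hv : pvIsValid grid p.1 p.2 = true
  · rw [if_pos hv, if_pos hv, pv_cell_rev _ _ _ hv]
  · rw [if_neg hv, if_neg hv]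

theorem pv_row_mir (grid : List (List String)) (r : Int) :
    PySem.List.pyGetD (grid.map List.reverse) r [] = (PySem.List.pyGetD grid r []).reverse := by
  have := PySem.List.pyGetD_map List.reverse grid r []
  simpa using this

theorem pv_valid_mir (grid : List (List String)) (r c : Int) :
    pvIsValid (grid.map List.reverse) r (((PySem.List.pyGetD grid r []).length : Int) - 1 - c) =
      pvIsValid grid r c := by
  rw [Bool.eq_iff_iff, pv_isValid_iff, pv_isValid_iff, pv_row_mir]
  simp only [List.length_map, List.length_reverse]
  omega

theorem pv_cell_mir (grid : List (List String)) (r c : Int) (h : pvIsValid grid r c = true) :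
    pvCell (grid.map List.reverse) r (((PySem.List.pyGetD grid r []).length : Int) - 1 - c) =
      pvCell grid r c := by
  have hv := (pv_isValid_iff grid r c).mp h
  unfold pvCell
  rw [pv_row_mir]
  set row := PySem.List.pyGetD grid r []
  rw [PySem.List.pyGetD_of_nonneg _ _ (by omega), PySem.List.pyGetD_of_nonneg _ _ hv.2.2.1]
  have hi : ((row.length : Int) - 1 - c).toNat < row.reverse.length := by
    simp only [List.length_reverse]; omega
  have hcn : c.toNat < row.length := by omega
  rw [List.getD_eq_getElem _ _ hi, List.getD_eq_getElem _ _ hcn, List.getElem_reverse]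
  congr 1
  omega

theorem pv_go_fst (grid : List (List String)) (cs : Int) :
    ∀ (f : Nat) (r c : Int), (pvGo grid 0 cs f r c).1 = r := by
  intro f
  induction f with
  | zero => intro r c; rfl
  | succ f ih =>
    intro r c
    by_cases hc : pvIsValid grid r c = true ∧ pvCell grid r c = "."
    · simp only [pvGo, if_pos hc]
      rw [ih (r + 0) (c + cs)]; ring
    · rw [pv_go_stop _ _ _ _ _ _ hc]

theorem pv_go_mir (grid : List (List String)) (r : Int) :
    ∀ (f : Nat) (c : Int),
      pvGo (grid.map List.reverse) 0 (-1) f r (((PySem.List.pyGetD grid r []).length : Int) - 1 - c) =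
        (r, ((PySem.List.pyGetD grid r []).length : Int) - 1 - (pvGo grid 0 1 f r c).2) := by
  intro f
  induction f with
  | zero => intro c; rfl
  | succ f ih =>
    intro c
    set n : Int := ((PySem.List.pyGetD grid r []).length : Int) with hn
    by_cases hc : pvIsValid grid r c = true ∧ pvCell grid r c = "."
    · have hv' : pvIsValid (grid.map List.reverse) r (n - 1 - c) = true := by
        rw [pv_valid_mir]; exact hc.1
      have hd' : pvCell (grid.map List.reverse) r (n - 1 - c) = "." := by
        rw [pv_cell_mir _ _ _ hc.1]; exact hc.2
      simp only [pvGo, if_pos hc, if_pos (And.intro hv' hd')]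
      rw [show n - 1 - c + -1 = n - 1 - (c + 1) by ring, show r + 0 = r by ring]
      exact ih (c + 1)
    · have hc' : ¬ (pvIsValid (grid.map List.reverse) r (n - 1 - c) = true ∧
          pvCell (grid.map List.reverse) r (n - 1 - c) = ".") := by
        intro ⟨hv', hd'⟩
        rw [pv_valid_mir] at hv'
        exact hc ⟨hv', by rw [pv_cell_mir _ _ _ hv'] at hd'; exact hd'⟩
      rw [pv_go_stop _ _ _ _ _ _ hc', pv_go_stop _ _ _ _ _ _ hc]

theorem pv_fuel_mir (grid : List (List String)) :
    pvFuel (grid.map List.reverse) = pvFuel grid := by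
  unfold pvFuel pvMaxLen
  simp [List.map_map, Function.comp_def]

theorem pv_seat_mir (grid : List (List String)) (r c : Int) :
    nextSeat (grid.map List.reverse) r (((PySem.List.pyGetD grid r []).length : Int) - 1 - c) 0 (-1) =
      nextSeat grid r c 0 1 := by
  simp only [nextSeat, pv_fuel_mir]
  rw [show (((PySem.List.pyGetD grid r []).length : Int) - 1 - c) + -1
        = ((PySem.List.pyGetD grid r []).length : Int) - 1 - (c + 1) by ring,
      show r + (0:Int) = r by ring,
      pv_go_mir grid r (pvFuel grid) (c + 1)]
  set p := pvGo grid 0 1 (pvFuel grid) (r + 0) (c + 1) with hp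
  have hfst : p.1 = r + 0 := pv_go_fst grid 1 (pvFuel grid) (r + 0) (c + 1)
  have hr0 : r + (0:Int) = r := by ring
  rw [hr0] at hp hfst
  rw [← hp]
  rw [show (r, ((PySem.List.pyGetD grid r []).length : Int) - 1 - p.2)
        = (p.1, ((PySem.List.pyGetD grid r []).length : Int) - 1 - p.2) by rw [hfst]]
  have hveq : pvIsValid (grid.map List.reverse) p.1
      (((PySem.List.pyGetD grid r []).length : Int) - 1 - p.2) = pvIsValid grid p.1 p.2 := by
    rw [hfst]
    exact pv_valid_mir grid r p.2
  rw [hveq]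
  by_cases hv : pvIsValid grid p.1 p.2 = true
  · rw [if_pos hv, if_pos hv]
    have := pv_cell_mir grid p.1 p.2 hv
    rw [hfst] at this ⊢
    exact this
  · rw [if_neg hv, if_neg hv]

theorem pv_scanLeftGo_length (l : List String) (cur : String) :
    (scanLeftGo l cur).length = l.length := by
  induction l generalizing cur with
  | nil => rfl
  | cons v rest ih => simp [scanLeftGo, ih]

theorem pv_valid_nat (grid : List (List String)) (r c : Nat) (hr : r < grid.length)
    (hc : c < (grid.getD r []).length) : pvIsValid grid (r : Int) (c : Int) = true := by
  rw [pv_isValid_iff]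
  refine ⟨by omega, by omega, by omega, ?_⟩
  rw [PySem.List.pyGetD_natCast]
  omega

theorem pv_scan_go (grid : List (List String)) (r : Nat) (row : List String)
    (hr : r < grid.length) (hrow : PySem.List.pyGetD grid (r : Int) [] = row) :
    ∀ (rest : List String) (k : Nat), rest = row.drop k →
      scanLeftGo rest (nextSeat grid (r : Int) (k : Int) 0 (-1)) =
        (List.range' k rest.length).map (fun c : Nat => nextSeat grid (r : Int) (c : Int) 0 (-1)) := by
  have hmax : row.length ≤ pvMaxLen grid := by
    apply pv_len_le_max
    rw [← hrow, PySem.List.pyGetD_natCast, List.getD_eq_getElem _ _ hr]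
    exact List.getElem_mem hr
  intro rest
  induction rest with
  | nil => intro k _; rfl
  | cons v rest' ih =>
    intro k hk
    have hklt : k < row.length := by
      by_contra hh
      rw [List.drop_eq_nil_of_le (by omega)] at hk
      simp at hk
    rw [List.drop_eq_getElem_cons hklt] at hk
    injection hk with hv hrest'
    have hv : row[k] = v := hv.symm
    have hgetd : grid.getD r [] = row := by rw [← hrow, PySem.List.pyGetD_natCast]
    have hcur : (if v ≠ "." then v else nextSeat grid (r : Int) (k : Int) 0 (-1))
        = nextSeat grid (r : Int) ((k + 1 : Nat) : Int) 0 (-1) := by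
      rw [pv_seat_rec_left grid (r : Int) ((k + 1 : Nat) : Int) (by push_cast; omega)]
      have e1 : ((k + 1 : Nat) : Int) - 1 = (k : Int) := by push_cast; ring
      rw [e1, if_pos (pv_valid_nat grid r k hr (by rw [hgetd]; omega))]
      have e2 : pvCell grid (r : Int) (k : Int) = v := by
        unfold pvCell
        rw [hrow, PySem.List.pyGetD_natCast, List.getD_eq_getElem _ _ hklt, hv]
      rw [e2]
      by_cases hd : v = "."
      · rw [if_pos hd, if_neg (by simp [hd])]
      · rw [if_neg hd, if_pos hd]
    show _ :: scanLeftGo rest' _ = _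
    rw [hcur, ih (k + 1) hrest']
    have : (List.range' k (rest'.length + 1)) = k :: List.range' (k + 1) rest'.length :=
      List.range'_succ
    simp [this]

theorem pv_scanLeft (grid : List (List String)) (r : Nat) (row : List String)
    (hr : r < grid.length) (hrow : PySem.List.pyGetD grid (r : Int) [] = row) :
    scanLeft row = (List.range row.length).map (fun c : Nat => nextSeat grid (r : Int) (c : Int) 0 (-1)) := by
  have h0 : nextSeat grid (r : Int) ((0 : Nat) : Int) 0 (-1) = "." := by
    rw [pv_seat_rec_left grid _ _ (by positivity)]
    rw [if_neg (by intro h; have := (pv_isValid_iff grid _ _).mp h; omega)]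
  unfold scanLeft
  rw [← h0, pv_scan_go grid r row hr hrow row 0 (by simp), List.range_eq_range']

def sRowUp (g : List (List String)) (dc : Int) (k : Nat) : List String :=
  (List.range ((g.getD k []).length)).map (fun c : Nat => nextSeat g (k : Int) (c : Int) (-1) dc)

def nbAt (g : List (List String)) (dc : Int) : Nat → Option (List String × List String)
  | 0 => none
  | k+1 => some (g.getD k [], sRowUp g dc k)

theorem pv_vert_go (g : List (List String)) (dc : Int) :
    ∀ (rest : List (List String)) (k : Nat), rest = g.drop k →
      vertGo dc rest (nbAt g dc k) = (List.range' k rest.length).map (sRowUp g dc) := by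
  intro rest
  induction rest with
  | nil => intro k _; rfl
  | cons row rest' ih =>
    intro k hk
    have hklt : k < g.length := by
      by_contra hh
      rw [List.drop_eq_nil_of_le (by omega)] at hk
      simp at hk
    rw [List.drop_eq_getElem_cons hklt] at hk
    injection hk with hv hrest'
    have hv : g[k] = row := hv.symm
    have hgetd : g.getD k [] = row := by rw [List.getD_eq_getElem _ _ hklt, hv]
    have hclaim : rowVisFrom (nbAt g dc k) row.length dc = sRowUp g dc k := by
      unfold sRowUp rowVisFrom
      rw [hgetd]
      apply List.map_congr_left
      intro c hcmem
      have hc : c < row.length := by simpa using hcmem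
      rw [pv_seat_rec_up g (k : Int) (c : Int) dc (by omega)]
      cases k with
      | zero =>
        show "." = _
        rw [if_neg (by intro h; have := (pv_isValid_iff g _ _).mp h; omega)]
      | succ k' =>
        show (if 0 ≤ (c : Int) + dc ∧ (c : Int) + dc < ((g.getD k' []).length : Int) then _ else _) = _
        have hval : pvIsValid g (((k' + 1 : Nat) : Int) - 1) ((c : Int) + dc) = true ↔
            (0 ≤ (c : Int) + dc ∧ (c : Int) + dc < ((g.getD k' []).length : Int)) := by
          rw [show ((k' + 1 : Nat) : Int) - 1 = ((k' : Nat) : Int) by push_cast; ring,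
              pv_isValid_iff, PySem.List.pyGetD_natCast]
          constructor
          · intro ⟨_, _, a, b⟩; exact ⟨a, b⟩
          · intro ⟨a, b⟩; exact ⟨by omega, by omega, a, b⟩
        by_cases hcond : 0 ≤ (c : Int) + dc ∧ (c : Int) + dc < ((g.getD k' []).length : Int)
        · rw [if_pos hcond, if_pos (hval.mpr hcond)]
          have ek : ((k' + 1 : Nat) : Int) - 1 = ((k' : Nat) : Int) := by push_cast; ring
          rw [ek]
          have ecell : PySem.List.pyGetD (g.getD k' []) ((c : Int) + dc) ""
              = pvCell g (k' : Int) ((c : Int) + dc) := by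
            unfold pvCell
            rw [PySem.List.pyGetD_natCast]
          rw [ecell]
          by_cases hdot : pvCell g (k' : Int) ((c : Int) + dc) = "."
          · rw [if_neg (by simp [hdot]), if_pos hdot]
            set m : Nat := ((c : Int) + dc).toNat with hm
            have hmc : (c : Int) + dc = (m : Int) := by omega
            have hmlt : m < (g.getD k' []).length := by omega
            rw [hmc, PySem.List.pyGetD_natCast]
            unfold sRowUp
            rw [PySem.List.getD_map_range _ _ _ _ hmlt]
          · rw [if_pos hdot, if_neg hdot]
        · rw [if_neg hcond, if_neg (by rw [hval]; exact hcond)]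
    show rowVisFrom (nbAt g dc k) row.length dc :: vertGo dc rest' (some (row, rowVisFrom (nbAt g dc k) row.length dc)) = _
    rw [hclaim]
    have hnb : some (row, sRowUp g dc k) = nbAt g dc (k + 1) := by
      show _ = some (g.getD k [], sRowUp g dc k)
      rw [hgetd]
    rw [hnb, ih (k + 1) hrest']
    have : (List.range' k (rest'.length + 1)) = k :: List.range' (k + 1) rest'.length :=
      List.range'_succ
    simp [this]

theorem pv_vert (g : List (List String)) (dc : Int) :
    vertGo dc g none = (List.range g.length).map (sRowUp g dc) := by
  have := pv_vert_go g dc g 0 (by simp)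
  rw [show nbAt g dc 0 = none from rfl] at this
  rw [this, List.range_eq_range']

theorem pv_T_up (grid : List (List String)) (dc : Int) (r c : Nat)
    (hr : r < grid.length) (hc : c < (grid.getD r []).length) :
    pvCell (sweepVertical grid (-1) dc) (r : Int) (c : Int) = nextSeat grid (r : Int) (c : Int) (-1) dc := by
  have hsw : sweepVertical grid (-1) dc = (List.range grid.length).map (sRowUp grid dc) := by
    simp only [sweepVertical, reduceIte]
    exact pv_vert grid dc
  unfold pvCell
  simp only [PySem.List.pyGetD_natCast]
  rw [hsw, PySem.List.getD_map_range _ _ _ _ hr]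
  unfold sRowUp
  rw [PySem.List.getD_map_range _ _ _ _ hc]

theorem pv_T_down (grid : List (List String)) (dc : Int) (r c : Nat)
    (hr : r < grid.length) (hc : c < (grid.getD r []).length) :
    pvCell (sweepVertical grid 1 dc) (r : Int) (c : Int) = nextSeat grid (r : Int) (c : Int) 1 dc := by
  have hne : ¬ ((1 : Int) = -1) := by decide
  have hsw : sweepVertical grid 1 dc = ((List.range grid.length).map (sRowUp grid.reverse dc)).reverse := by
    simp only [sweepVertical, if_neg hne]
    rw [pv_vert grid.reverse dc, List.length_reverse]
  have hrow : grid.reverse.getD (grid.length - 1 - r) [] = grid.getD r [] := by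
    rw [List.getD_eq_getElem _ _ (by simp; omega), List.getD_eq_getElem _ _ hr,
        List.getElem_reverse]
    congr 1
    omega
  have hTrow : (sweepVertical grid 1 dc).getD r [] = sRowUp grid.reverse dc (grid.length - 1 - r) := by
    rw [hsw]
    rw [List.getD_eq_getElem _ _ (by simp; exact hr)]
    rw [List.getElem_reverse]
    simp only [List.length_map, List.length_range, List.getElem_map, List.getElem_range]
  unfold pvCell
  simp only [PySem.List.pyGetD_natCast]
  rw [hTrow]
  unfold sRowUp
  rw [hrow, PySem.List.getD_map_range _ _ _ _ hc]
  have hcast : ((grid.length - 1 - r : Nat) : Int) = (grid.length : Int) - 1 - (r : Int) := by omega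
  rw [hcast, pv_seat_rev grid (r : Int) (c : Int) dc (by omega) (by omega)]

theorem pv_T_left (grid : List (List String)) (r c : Nat)
    (hr : r < grid.length) (hc : c < (grid.getD r []).length) :
    pvCell (sweepHorizontal grid (-1)) (r : Int) (c : Int) = nextSeat grid (r : Int) (c : Int) 0 (-1) := by
  have hrow : PySem.List.pyGetD grid (r : Int) [] = grid.getD r [] := PySem.List.pyGetD_natCast _ _ _
  have hTrow : (sweepHorizontal grid (-1)).getD r [] = scanLeft (grid.getD r []) := by
    simp only [sweepHorizontal, reduceIte]
    rw [List.getD_eq_getElem _ _ (by simpa using hr), List.getElem_map]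
    rw [List.getD_eq_getElem _ _ hr]
  unfold pvCell
  simp only [PySem.List.pyGetD_natCast]
  rw [hTrow, pv_scanLeft grid r (grid.getD r []) hr hrow,
      PySem.List.getD_map_range _ _ _ _ hc]

theorem pv_T_right (grid : List (List String)) (r c : Nat)
    (hr : r < grid.length) (hc : c < (grid.getD r []).length) :
    pvCell (sweepHorizontal grid 1) (r : Int) (c : Int) = nextSeat grid (r : Int) (c : Int) 0 1 := by
  have hne : ¬ ((1 : Int) = -1) := by decide
  have hrow : PySem.List.pyGetD grid (r : Int) [] = grid.getD r [] := PySem.List.pyGetD_natCast _ _ _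
  set row : List String := grid.getD r [] with hrowdef
  set n : Nat := row.length with hn
  have hTrow : (sweepHorizontal grid 1).getD r [] = (scanLeft row.reverse).reverse := by
    simp only [sweepHorizontal, if_neg hne]
    rw [List.getD_eq_getElem _ _ (by simpa using hr), List.getElem_map]
    rw [hrowdef, List.getD_eq_getElem _ _ hr]
  have hsl : scanLeft row.reverse =
      (List.range row.reverse.length).map
        (fun c : Nat => nextSeat (grid.map List.reverse) (r : Int) (c : Int) 0 (-1)) := by
    apply pv_scanLeft (grid.map List.reverse) r row.reverse (by simpa using hr)
    rw [pv_row_mir, hrow]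
  have hlen2 : (scanLeft row.reverse).length = n := by
    unfold scanLeft
    rw [pv_scanLeftGo_length, List.length_reverse]
  have hval : ((scanLeft row.reverse).reverse).getD c "" =
      nextSeat (grid.map List.reverse) (r : Int) ((n - 1 - c : Nat) : Int) 0 (-1) := by
    rw [congrArg List.reverse hsl]
    rw [List.getD_eq_getElem _ _ (by simp; omega), List.getElem_reverse]
    simp only [List.length_map, List.length_range, List.length_reverse, List.getElem_map,
      List.getElem_range]
    rw [← hn]
  unfold pvCell
  simp only [PySem.List.pyGetD_natCast]
  rw [hTrow, hval]
  have hcast : ((n - 1 - c : Nat) : Int) = ((PySem.List.pyGetD grid (r : Int) []).length : Int) - 1 - (c : Int) := by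
    rw [hrow]
    omega
  rw [hcast, pv_seat_mir grid (r : Int) (c : Int)]

def pvInd (grid : List (List String)) (r c x y : Int) : Int :=
  if nextSeat grid r c x y = "#" then 1 else 0

theorem pv_foldl_count {α : Type} (p : α → Prop) [DecidablePred p] (l : List α) (a : Int) :
    List.foldl (fun acc x => if p x then acc + 1 else acc) a l
      = a + (l.countP (fun x => decide (p x)) : Int) := by
  rw [← PySem.List.foldl_count_if]
  apply PySem.List.foldl_congr_mem
  intro acc x _
  by_cases h : p x <;> simp [h]

theorem pv_sumAdj_explicit (grid : List (List String)) (r c : Int) :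
    sumAdjacents grid r c =
      pvInd grid r c (-1) (-1) + pvInd grid r c (-1) 0 + pvInd grid r c (-1) 1 +
      pvInd grid r c 0 (-1) + pvInd grid r c 0 1 +
      pvInd grid r c 1 (-1) + pvInd grid r c 1 0 + pvInd grid r c 1 1 := by
  have hrange : PySem.List.pyRange (-1) 2 1 = [-1, 0, 1] := by decide
  unfold sumAdjacents
  rw [hrange]
  simp only [pv_foldl_count]
  simp only [List.foldl_cons, List.foldl_nil]
  simp only [List.countP_cons, List.countP_nil, decide_eq_true_eq]
  unfold pvInd
  norm_num
  ring_nf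

theorem pv_count_eq (grid : List (List String)) (r c : Nat)
    (hr : r < grid.length) (hc : c < (grid.getD r []).length) :
    countSharp (pvTables grid) (r : Int) (c : Int) = sumAdjacents grid (r : Int) (c : Int) := by
  unfold countSharp
  rw [pv_foldl_count]
  unfold pvTables
  simp only [List.countP_cons, List.countP_nil, decide_eq_true_eq]
  rw [pv_T_up grid (-1) r c hr hc, pv_T_up grid 0 r c hr hc, pv_T_up grid 1 r c hr hc,
      pv_T_down grid (-1) r c hr hc, pv_T_down grid 0 r c hr hc, pv_T_down grid 1 r c hr hc,
      pv_T_left grid r c hr hc, pv_T_right grid r c hr hc,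
      pv_sumAdj_explicit]
  unfold pvInd
  push_cast
  ring
theorem pv_cell_eq (grid : List (List String)) (r c : Nat)
    (hr : r < grid.length) (hc : c < (grid.getD r []).length) :
    altCell (pvTables grid) (r : Int) (c : Int) ((grid.getD r []).getD c "") =
      nextState grid (r : Int) (c : Int) := by
  unfold altCell nextState
  rw [pv_count_eq grid r c hr hc, pv_cell_nat]

theorem pv_sum_count {α : Type} (p : α → Prop) [DecidablePred p] (l : List α) :
    (l.map (fun x => if p x then (1 : Int) else 0)).sum
      = (l.countP (fun x => decide (p x)) : Int) := by
  rw [← PySem.List.sum_map_ite_one_zero]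
  congr 1
  apply List.map_congr_left
  intro x _
  by_cases h : p x <;> simp [h]

theorem pv_enum_range {α : Type} (d : α) (l : List α) :
    ∀ (n : Nat), PySem.List.enumerate l (n : Int) =
      (List.range l.length).map (fun i : Nat => (((n + i : Nat) : Int), l.getD i d)) := by
  induction l with
  | nil => intro n; rfl
  | cons x t ih =>
    intro n
    show ((n : Int), x) :: PySem.List.enumerate t ((n : Int) + 1) = _
    rw [show ((n : Int) + 1) = ((n + 1 : Nat) : Int) by push_cast; ring, ih (n + 1)]
    rw [List.length_cons, List.range_succ_eq_map]
    simp only [List.map_cons, List.map_map]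
    have htail : List.map ((fun i : Nat => (((n + i : Nat) : Int), (x :: t).getD i d)) ∘ Nat.succ)
        (List.range t.length)
        = List.map (fun i : Nat => (((n + 1 + i : Nat) : Int), t.getD i d)) (List.range t.length) := by
      apply List.map_congr_left
      intro i _
      simp only [Function.comp_apply, List.getD_cons_succ]
      congr 2
      omega
    rw [htail]
    simp

theorem pv_rowset (f : Nat → String) :
    ∀ (m j : Nat) (row : List String), j + m ≤ row.length →
      List.foldl (fun rw c => rw.set c (f c)) row (List.range' j m) =
        row.take j ++ (List.range' j m).map f ++ row.drop (j + m) := by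
  intro m
  induction m with
  | zero => intro j row h; simp
  | succ m ih =>
    intro j row h
    have hj : j < row.length := by omega
    rw [List.range'_succ, List.foldl_cons, ih (j + 1) (row.set j (f j)) (by simp; omega)]
    have hset : row.set j (f j) = row.take j ++ f j :: row.drop (j + 1) := by
      rw [List.set_eq_take_append_cons_drop, if_pos hj]
    have hlt : (row.take j).length = j := by simp; omega
    have T1 : (row.set j (f j)).take (j + 1) = row.take j ++ [f j] := by
      rw [hset, List.take_append, hlt, List.take_of_length_le (l := row.take j) (by omega),
          show j + 1 - j = 1 from by omega]
      simp
    have T2 : (row.set j (f j)).drop (j + 1 + m) = row.drop (j + (m + 1)) := by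
      rw [hset, List.drop_append, hlt, List.drop_eq_nil_of_le (as := row.take j) (by omega),
          show j + 1 + m - j = m + 1 from by omega]
      simp only [List.drop_succ_cons, List.drop_drop, List.nil_append]
      congr 1
      omega
    rw [T1, T2, List.map_cons]
    simp [List.append_assoc]

theorem pv_gridset (f : Nat → String) (k : Nat) :
    ∀ (l : List Nat) (g0 : List (List String)), k < g0.length →
      List.foldl (fun g c => g.set k ((g.getD k []).set c (f c))) g0 l =
        g0.set k (List.foldl (fun rw c => rw.set c (f c)) (g0.getD k []) l) := by
  intro l
  induction l with
  | nil =>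
    intro g0 hk
    simp only [List.foldl_nil]
    rw [List.getD_eq_getElem _ _ hk, List.set_getElem_self]
  | cons c rest ih =>
    intro g0 hk
    simp only [List.foldl_cons]
    rw [ih (g0.set k ((g0.getD k []).set c (f c))) (by simpa using hk)]
    have hgd : (g0.set k ((g0.getD k []).set c (f c))).getD k [] = (g0.getD k []).set c (f c) := by
      rw [List.getD_eq_getElem _ _ (by simpa using hk)]
      simp
    rw [hgd, List.set_set]

def pvOutRow (grid : List (List String)) (r : Nat) : List String :=
  (List.range ((grid.getD r []).length)).map (fun c : Nat => nextState grid (r : Int) (c : Int))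

def pvChg (grid : List (List String)) : Int :=
  ((List.range grid.length).map (fun r : Nat =>
    (((List.range ((grid.getD r []).length)).countP
        (fun c : Nat => decide (nextState grid (r : Int) (c : Int) ≠ pvCell grid (r : Int) (c : Int)))) : Int))).sum

theorem pv_enum_range0 {α : Type} (d : α) (l : List α) :
    PySem.List.enumerate l 0 = (List.range l.length).map (fun i : Nat => ((i : Int), l.getD i d)) := by
  have := pv_enum_range d l 0
  simpa using this

theorem pv_outerA (grid : List (List String)) :
    ∀ (m j : Nat), j + m = grid.length →
      List.foldl
        (fun g (r : Nat) => List.foldl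
          (fun g (c : Nat) => g.set r ((g.getD r []).set c (nextState grid (r : Int) (c : Int))))
          g (List.range ((grid.getD r []).length)))
        ((List.range j).map (pvOutRow grid) ++ grid.drop j) (List.range' j m)
      = (List.range grid.length).map (pvOutRow grid) := by
  intro m
  induction m with
  | zero =>
    intro j hj
    have : j = grid.length := by omega
    subst this
    simp
  | succ m ih =>
    intro j hj
    rw [List.range'_succ, List.foldl_cons]
    have hjR : j < grid.length := by omega
    have hlen : ((List.range j).map (pvOutRow grid) ++ grid.drop j).length = grid.length := by
      simp; omega
    rw [pv_gridset _ j _ _ (by rw [hlen]; omega)]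
    have hg0j : ((List.range j).map (pvOutRow grid) ++ grid.drop j).getD j [] = grid.getD j [] := by
      rw [List.getD_eq_getElem _ _ (by rw [hlen]; omega)]
      rw [List.getElem_append_right (by simp)]
      simp only [List.length_map, List.length_range]
      rw [List.getElem_drop, List.getD_eq_getElem _ _ hjR]
      congr 1
      omega
    rw [hg0j]
    have hrow := pv_rowset (fun c : Nat => nextState grid (j : Int) (c : Int))
      ((grid.getD j []).length) 0 (grid.getD j []) (by omega)
    rw [← List.range_eq_range'] at hrow
    rw [hrow]
    have hout : (grid.getD j []).take 0 ++
        (List.range ((grid.getD j []).length)).map (fun c : Nat => nextState grid (j : Int) (c : Int)) ++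
        (grid.getD j []).drop (0 + ((grid.getD j []).length)) = pvOutRow grid j := by
      simp [pvOutRow]
    rw [hout]
    have hset : ((List.range j).map (pvOutRow grid) ++ grid.drop j).set j (pvOutRow grid j)
        = (List.range (j + 1)).map (pvOutRow grid) ++ grid.drop (j + 1) := by
      rw [List.set_append, if_neg (by simp)]
      simp only [List.length_map, List.length_range, Nat.sub_self]
      rw [List.drop_eq_getElem_cons hjR, List.set_cons_zero]
      rw [List.range_succ, List.map_append, List.map_cons, List.map_nil]
      simp [List.append_assoc]
    rw [hset]
    exact ih (j + 1) (by omega)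

theorem pv_foldl_prod {β σ₁ σ₂ : Type} (f : σ₁ → β → σ₁) (g : σ₂ → β → σ₂) (l : List β)
    (p : σ₁ × σ₂) :
    List.foldl (fun s e => (f s.1 e, g s.2 e)) p l = (List.foldl f p.1 l, List.foldl g p.2 l) := by
  rw [show p = (p.1, p.2) from rfl, PySem.List.foldl_prod_mk]

theorem pv_execA (grid : List (List String)) :
    execute grid = (pvChg grid, (List.range grid.length).map (pvOutRow grid)) := by
  unfold execute
  rw [PySem.List.pyRange_zero_natCast, List.foldl_map]
  simp only [PySem.List.pyGetD_natCast]
  simp only [PySem.List.pyRange_zero_natCast]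
  simp only [List.foldl_map]
  simp only [pvSet2]
  simp only [Int.toNat_natCast]
  simp only [PySem.List.pyGetD_natCast]
  rw [PySem.List.foldl_congr_mem (List.range grid.length) _
        (fun st (r : Nat) =>
          ((List.foldl (fun s (c : Nat) =>
              if nextState grid (r : Int) (c : Int) ≠ pvCell grid (r : Int) (c : Int) then s + 1 else s)
            st.1 (List.range ((grid.getD r []).length))),
           (List.foldl (fun g (c : Nat) =>
              g.set r ((g.getD r []).set c (nextState grid (r : Int) (c : Int))))
            st.2 (List.range ((grid.getD r []).length)))))
        ((0 : Int), grid)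
        (fun acc x _ => pv_foldl_prod _ _ _ acc)]
  rw [pv_foldl_prod
        (fun s (r : Nat) => List.foldl (fun s (c : Nat) =>
            if nextState grid (r : Int) (c : Int) ≠ pvCell grid (r : Int) (c : Int) then s + 1 else s)
          s (List.range ((grid.getD r []).length)))
        (fun g (r : Nat) => List.foldl (fun g (c : Nat) =>
            g.set r ((g.getD r []).set c (nextState grid (r : Int) (c : Int))))
          g (List.range ((grid.getD r []).length)))
        (List.range grid.length) ((0 : Int), grid)]
  rw [Prod.mk.injEq]
  constructor
  · simp only [pv_foldl_count, PySem.List.foldl_add]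
    unfold pvChg
    simp
  · have := pv_outerA grid grid.length 0 (by omega)
    rw [← List.range_eq_range'] at this
    simpa using this

theorem pv_execB (grid : List (List String)) :
    execute_alt grid = (pvChg grid, (List.range grid.length).map (pvOutRow grid)) := by
  unfold execute_alt
  rw [pv_enum_range0 ([] : List String) grid, List.foldl_map]
  simp only [pv_enum_range0 ("" : String), List.foldl_map]
  have hstep : ∀ (acc : Int × List (List String)) (y : Nat),
      ((List.foldl (fun (x : Int × List String) (c : Nat) =>
          (x.1 + (if altCell (pvTables grid) (y : Int) (c : Int) ((grid.getD y []).getD c "") ≠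
                    (grid.getD y []).getD c "" then (1 : Int) else 0),
           x.2 ++ [altCell (pvTables grid) (y : Int) (c : Int) ((grid.getD y []).getD c "")]))
        (acc.1, ([] : List String)) (List.range ((grid.getD y []).length))).1,
       acc.2 ++ [(List.foldl (fun (x : Int × List String) (c : Nat) =>
          (x.1 + (if altCell (pvTables grid) (y : Int) (c : Int) ((grid.getD y []).getD c "") ≠
                    (grid.getD y []).getD c "" then (1 : Int) else 0),
           x.2 ++ [altCell (pvTables grid) (y : Int) (c : Int) ((grid.getD y []).getD c "")]))
        (acc.1, ([] : List String)) (List.range ((grid.getD y []).length))).2])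
      = (List.foldl (fun s (c : Nat) =>
            s + if altCell (pvTables grid) (y : Int) (c : Int) ((grid.getD y []).getD c "") ≠
                  (grid.getD y []).getD c "" then (1 : Int) else 0)
          acc.1 (List.range ((grid.getD y []).length)),
         acc.2 ++ [(List.range ((grid.getD y []).length)).map
            (fun c : Nat => altCell (pvTables grid) (y : Int) (c : Int) ((grid.getD y []).getD c ""))]) := by
    intro acc y
    rw [pv_foldl_prod
          (fun s (c : Nat) =>
            s + if altCell (pvTables grid) (y : Int) (c : Int) ((grid.getD y []).getD c "") ≠
                  (grid.getD y []).getD c "" then (1 : Int) else 0)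
          (fun acc2 (c : Nat) =>
            acc2 ++ [altCell (pvTables grid) (y : Int) (c : Int) ((grid.getD y []).getD c "")])
          (List.range ((grid.getD y []).length)) (acc.1, ([] : List String))]
    rw [PySem.List.foldl_append_singleton_eq_map]
    simp
  rw [PySem.List.foldl_congr_mem (List.range grid.length) _ _
        ((0 : Int), ([] : List (List String))) (fun acc x _ => hstep acc x)]
  rw [pv_foldl_prod
        (fun s (y : Nat) => List.foldl (fun s (c : Nat) =>
            s + if altCell (pvTables grid) (y : Int) (c : Int) ((grid.getD y []).getD c "") ≠
                  (grid.getD y []).getD c "" then (1 : Int) else 0)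
          s (List.range ((grid.getD y []).length)))
        (fun acc (y : Nat) => acc ++ [(List.range ((grid.getD y []).length)).map
            (fun c : Nat => altCell (pvTables grid) (y : Int) (c : Int) ((grid.getD y []).getD c ""))])
        (List.range grid.length) ((0 : Int), ([] : List (List String)))]
  rw [Prod.mk.injEq]
  constructor
  · simp only [PySem.List.foldl_add]
    simp only [pv_sum_count]
    unfold pvChg
    rw [zero_add]
    congr 1
    apply List.map_congr_left
    intro r hrmem
    have hr : r < grid.length := by simpa using hrmem
    congr 1
    apply List.countP_congr
    intro c hcmem
    have hc : c < (grid.getD r []).length := by simpa using hcmem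
    simp only [decide_eq_true_eq]
    rw [pv_cell_eq grid r c hr hc, ← pv_cell_nat grid r c]
  · rw [PySem.List.foldl_append_singleton_eq_map, List.nil_append]
    apply List.map_congr_left
    intro r hrmem
    have hr : r < grid.length := by simpa using hrmem
    unfold pvOutRow
    apply List.map_congr_left
    intro c hcmem
    have hc : c < (grid.getD r []).length := by simpa using hcmem
    exact pv_cell_eq grid r c hr hc

-- ===== VERDICT (by name: the statement is the Claim_ definition above) =====
theorem execute_spec : Claim_equal_execute := by
  intro grid _
  unfold Spec_execute
  rw [pv_execA, pv_execB]
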